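-- pv_equiv track=rewrite | github.com/Dog-AI-Agent/dog-ai-agent_mvp | data/extract_disorders.py | find_disorders_in_text
-- ===== SOURCE A (Python) =====
-- def find_disorders_in_text(text: str, disorder_names: list[str]) -> list[str]:
--     """Return list of disorder names that appear in text. Prefer longer (more specific) names."""
--     found = []
--     text_lower = text.lower()
--     for name in disorder_names:
--         if name.lower() in text_lower:
--             name_lower = name.lower()
--             if not any(
--                 name_lower != f.lower() and name_lower in f.lower()
--                 for f in found
--             ):
--                 found.append(name)
--     return found
-- ===== SOURCE B (Python) =====
-- def find_disorders_in_text(text: str, disorder_names: list[str]) -> list[str]: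
--     """Return list of disorder names that appear in text. Prefer longer (more specific) names.
--
--     Two-pass version: lower each name once, keep the names present in the text
--     (paired with their lowered form), then accept a name unless an EARLIER
--     present name strictly contains it (equivalent to A's check against the
--     accepted ones, since strict containment is transitive)."""
--     text_lower = text.lower()
--     present = [(n, n.lower()) for n in disorder_names if n.lower() in text_lower]
--     result = []
--     seen = []  # lowered forms of all present names so far
--     for n, nl in present:
--         if not any(nl != s and nl in s for s in seen):
--             result.append(n)
--         seen.append(nl)
--     return result
-- ===== Notes on version B (the rewrite author's own statement) =====
-- stated objective: alternative
-- what changed: B lowers each name once, builds the list of (name, lowered) pairs present in the text in a first pass, and in a second pass accepts a name unless any earlier PRESENT lowered name strictly contains it (equivalent to A's check against the accepted ones by transitivity of strict containment), instead of A's single loop that re-lowers the growing found list on every membership test.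
import Mathlib
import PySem

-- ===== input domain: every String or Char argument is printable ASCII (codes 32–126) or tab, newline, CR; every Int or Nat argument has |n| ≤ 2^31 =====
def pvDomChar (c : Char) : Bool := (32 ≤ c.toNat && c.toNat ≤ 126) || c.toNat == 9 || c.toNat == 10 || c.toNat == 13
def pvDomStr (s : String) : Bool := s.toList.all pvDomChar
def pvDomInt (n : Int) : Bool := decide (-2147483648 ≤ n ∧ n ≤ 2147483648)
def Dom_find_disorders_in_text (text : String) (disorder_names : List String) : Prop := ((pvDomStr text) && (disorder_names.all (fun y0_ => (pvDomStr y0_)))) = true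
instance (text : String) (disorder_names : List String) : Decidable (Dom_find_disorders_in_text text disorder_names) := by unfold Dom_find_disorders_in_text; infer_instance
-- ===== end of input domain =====

-- B = two-pass rewrite: lower each name once, collect (name, lowered) pairs present in the text,
-- then filter against all earlier present lowered names (same return value as A; no side effects).


-- ===== PORT A =====
def find_disorders_in_text (text : String) (disorder_names : List String) : List String :=
  let text_lower := PySem.Str.lower text
  disorder_names.foldl (fun found name =>
    if PySem.Str.isIn (PySem.Str.lower name) text_lower then
      let name_lower := PySem.Str.lower name
      if found.any (fun f => (name_lower != PySem.Str.lower f) && PySem.Str.isIn name_lower (PySem.Str.lower f)) then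
        found
      else
        found ++ [name]
    else found) []

-- ===== PORT B =====
-- the second pass of Source B: walk the present (name, lowered) pairs carrying result and seen
def pvAltLoop : List (String × String) → List String → List String → List String
  | [], result, _ => result
  | (n, nl) :: rest, result, seen =>
      pvAltLoop rest
        (if seen.any (fun s => (nl != s) && PySem.Str.isIn nl s) then result else result ++ [n])
        (seen ++ [nl])

def find_disorders_in_text_alt (text : String) (disorder_names : List String) : List String :=
  let text_lower := PySem.Str.lower text
  let present := (disorder_names.map (fun n => (n, PySem.Str.lower n))).filter
    (fun p => PySem.Str.isIn p.2 text_lower)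
  pvAltLoop present [] []

-- ===== PRECONDITION & SPEC =====
def Spec_find_disorders_in_text (text : String) (disorder_names : List String) (out : List String) : Prop := out = find_disorders_in_text_alt text disorder_names
instance (text : String) (disorder_names : List String) (out : List String) : Decidable (Spec_find_disorders_in_text text disorder_names out) := by unfold Spec_find_disorders_in_text; infer_instance

-- ===== CLAIM (what is proved, stated in full; the proofs are below) =====
def Claim_equal_find_disorders_in_text : Prop := ∀ (text : String) (disorder_names : List String), Dom_find_disorders_in_text text disorder_names → Spec_find_disorders_in_text text disorder_names (find_disorders_in_text text disorder_names)

-- ===== LEMMAS AND PROOFS =====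

-- 'x is a strict (case already lowered) substring of a'
def pvStrict (x a : String) : Prop := x ≠ a ∧ x.toList <:+: a.toList

theorem pvStrict_trans {x a b : String} (h1 : pvStrict x a) (h2 : pvStrict a b) : pvStrict x b := by
  obtain ⟨hne1, hinf1⟩ := h1
  obtain ⟨hne2, hinf2⟩ := h2
  refine ⟨?_, hinf1.trans hinf2⟩
  have hlt1 : x.toList.length < a.toList.length := by
    have hle := hinf1.length_le
    rcases lt_or_eq_of_le hle with h | h
    · exact h
    · exact absurd (String.toList_inj.mp (hinf1.eq_of_length h)) hne1
  have hlt2 : a.toList.length < b.toList.length := by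
    have hle := hinf2.length_le
    rcases lt_or_eq_of_le hle with h | h
    · exact h
    · exact absurd (String.toList_inj.mp (hinf2.eq_of_length h)) hne2
  intro hxb
  subst hxb
  omega

-- the invariant: A's 'found' and B's 'seen' reject exactly the same lowered strings
def pvInv (found seen : List String) : Prop :=
  ∀ x : String,
    (∃ f ∈ found, pvStrict x (PySem.Str.lower f)) ↔ (∃ s ∈ seen, pvStrict x s)

theorem pvAny_iff_found (found : List String) (x : String) :
    (found.any (fun f => (x != PySem.Str.lower f) && PySem.Str.isIn x (PySem.Str.lower f)) = true)
      ↔ (∃ f ∈ found, pvStrict x (PySem.Str.lower f)) := by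
  simp [List.any_eq_true, pvStrict, PySem.Chars.isIn_iff_infix]

theorem pvAny_iff_seen (seen : List String) (x : String) :
    (seen.any (fun s => (x != s) && PySem.Str.isIn x s) = true) ↔ (∃ s ∈ seen, pvStrict x s) := by
  simp [List.any_eq_true, pvStrict, PySem.Chars.isIn_iff_infix]

theorem pvMain (tl : String) :
    ∀ (names : List String) (found seen : List String), pvInv found seen →
      names.foldl (fun found name =>
        if PySem.Str.isIn (PySem.Str.lower name) tl then
          if found.any (fun f => (PySem.Str.lower name != PySem.Str.lower f) &&
              PySem.Str.isIn (PySem.Str.lower name) (PySem.Str.lower f)) then found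
          else found ++ [name]
        else found) found
      = pvAltLoop ((names.map (fun n => (n, PySem.Str.lower n))).filter
          (fun p => PySem.Str.isIn p.2 tl)) found seen := by
  intro names
  induction names with
  | nil => intro found seen _; simp [pvAltLoop]
  | cons name rest ih =>
    intro found seen hinv
    by_cases hpres : PySem.Str.isIn (PySem.Str.lower name) tl = true
    · -- present: both loops examine name
      have hrej : (found.any (fun f => (PySem.Str.lower name != PySem.Str.lower f) &&
            PySem.Str.isIn (PySem.Str.lower name) (PySem.Str.lower f)))
          = (seen.any (fun s => (PySem.Str.lower name != s) && PySem.Str.isIn (PySem.Str.lower name) s)) := by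
        rw [Bool.eq_iff_iff, pvAny_iff_found, pvAny_iff_seen]
        exact hinv _
      simp only [List.foldl_cons, List.map_cons, List.filter_cons, hpres, if_pos, pvAltLoop]
      rw [hrej]
      rcases Bool.eq_false_or_eq_true (seen.any (fun s => (PySem.Str.lower name != s) && PySem.Str.isIn (PySem.Str.lower name) s)) with h | h
      all_goals rw [h]
      · -- rejected: some accepted g already strictly contains name's lowered form
        obtain ⟨g, hgm, hgs⟩ := (pvAny_iff_found found _).mp (hrej.trans h)
        apply ih
        intro x
        constructor
        · rintro ⟨f, hf, hs⟩
          obtain ⟨s, hsmem, hss⟩ := (hinv x).mp ⟨f, hf, hs⟩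
          exact ⟨s, List.mem_append_left _ hsmem, hss⟩
        · rintro ⟨s, hsm, hss⟩
          rcases List.mem_append.mp hsm with hsm | hsm
          · exact (hinv x).mpr ⟨s, hsm, hss⟩
          · simp only [List.mem_singleton] at hsm
            subst hsm
            exact ⟨g, hgm, pvStrict_trans hss hgs⟩
      · -- accepted: both append name / its lowered form
        apply ih
        intro x
        constructor
        · rintro ⟨f, hf, hs⟩
          rcases List.mem_append.mp hf with hf | hf
          · obtain ⟨s, hsmem, hss⟩ := (hinv x).mp ⟨f, hf, hs⟩
            exact ⟨s, List.mem_append_left _ hsmem, hss⟩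
          · simp only [List.mem_singleton] at hf
            subst hf
            exact ⟨PySem.Str.lower f, List.mem_append_right _ (List.mem_singleton.mpr rfl), hs⟩
        · rintro ⟨s, hsm, hss⟩
          rcases List.mem_append.mp hsm with hsm | hsm
          · obtain ⟨f, hfm, hfs⟩ := (hinv x).mpr ⟨s, hsm, hss⟩
            exact ⟨f, List.mem_append_left _ hfm, hfs⟩
          · simp only [List.mem_singleton] at hsm
            subst hsm
            exact ⟨name, List.mem_append_right _ (List.mem_singleton.mpr rfl), hss⟩
    · -- absent: both skip
      simp only [List.foldl_cons, List.map_cons, List.filter_cons, hpres]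
      simp only [Bool.false_eq_true, if_false]
      exact ih found seen hinv

-- ===== VERDICT (by name: the statement is the Claim_ definition above) =====
theorem find_disorders_in_text_spec : Claim_equal_find_disorders_in_text := by
  intro text names _
  unfold Spec_find_disorders_in_text find_disorders_in_text find_disorders_in_text_alt
  exact pvMain (PySem.Str.lower text) names [] [] (by intro x; simp)
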